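-- pv_equiv track=rewrite | github.com/leehyowon14/Python_Study | 이효원/Programmers/연습문제/공원 산책/1st_solution.py | get_south_barrier
-- ===== SOURCE A (Python) =====
-- def get_south_barrier(pos, barrier_pos_list):
--     distance = sorted([
--         item[1] - pos[1]
--         for item in barrier_pos_list
--         if item[0] == pos[0] and item[1] - pos[1] > 0
--     ])
--     if len(distance) == 0:
--         return [0, 0]
--     return [0, distance[0]]
-- ===== SOURCE B (Python) =====
-- def get_south_barrier(pos, barrier_pos_list):
--     best = None
--     for item in barrier_pos_list:
--         if item[0] == pos[0]:
--             d = item[1] - pos[1]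
--             if d > 0 and (best is None or d < best):
--                 best = d
--     if best is None:
--         return [0, 0]
--     return [0, best]
-- ===== Notes on version B (the rewrite author's own statement) =====
-- stated objective: alternative
-- what changed: Replaces A's materialize-a-filtered-list-then-sort-and-take-head approach by a single pass over barrier_pos_list maintaining a running minimum distance, with no intermediate list; O(n) scan instead of O(n log n) sort, though not measurably faster in CPython.
import Mathlib
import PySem

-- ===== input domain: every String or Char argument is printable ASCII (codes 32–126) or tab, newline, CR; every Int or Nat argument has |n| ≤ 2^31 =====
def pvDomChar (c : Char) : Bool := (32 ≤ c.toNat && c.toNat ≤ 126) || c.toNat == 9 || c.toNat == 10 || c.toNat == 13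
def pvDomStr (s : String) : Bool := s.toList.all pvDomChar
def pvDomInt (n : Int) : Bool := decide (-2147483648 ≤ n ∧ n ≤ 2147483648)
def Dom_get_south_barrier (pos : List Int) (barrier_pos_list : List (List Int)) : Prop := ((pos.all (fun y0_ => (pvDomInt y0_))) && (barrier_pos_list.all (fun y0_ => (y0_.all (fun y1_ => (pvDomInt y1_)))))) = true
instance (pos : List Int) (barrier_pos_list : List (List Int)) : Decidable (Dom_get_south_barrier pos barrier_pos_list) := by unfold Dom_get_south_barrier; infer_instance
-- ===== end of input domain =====

-- B replaces A's build-filtered-list-then-sort-and-take-head by a single running-minimum pass (alternative algorithm, same observed cost).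

-- ===== PORT A =====
-- the comprehension's filter+map: emits item[1]-pos[1] when item[0]==pos[0] and it is > 0
def aItem (pos : List Int) (item : List Int) : Option Int :=
  if (PySem.List.pyGet? item 0).getD 0 = (PySem.List.pyGet? pos 0).getD 0 ∧
     0 < (PySem.List.pyGet? item 1).getD 0 - (PySem.List.pyGet? pos 1).getD 0 then
    some ((PySem.List.pyGet? item 1).getD 0 - (PySem.List.pyGet? pos 1).getD 0)
  else none

def get_south_barrier (pos : List Int) (barrier_pos_list : List (List Int)) : List Int :=
  let distance := PySem.List.sorted (barrier_pos_list.filterMap (aItem pos)) (fun x => x) false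
  if distance.length = 0 then [0, 0]
  else [0, (PySem.List.pyGet? distance 0).getD 0]

-- ===== PORT B =====
-- one loop step: update the running best (Option Int, none = Python's None)
def bStep (pos : List Int) (best : Option Int) (item : List Int) : Option Int :=
  if (PySem.List.pyGet? item 0).getD 0 = (PySem.List.pyGet? pos 0).getD 0 then
    let d := (PySem.List.pyGet? item 1).getD 0 - (PySem.List.pyGet? pos 1).getD 0
    match best with
    | none => if 0 < d then some d else none
    | some b => if 0 < d ∧ d < b then some d else some b
  else best

def get_south_barrier_alt (pos : List Int) (barrier_pos_list : List (List Int)) : List Int :=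
  match barrier_pos_list.foldl (bStep pos) none with
  | none => [0, 0]
  | some b => [0, b]

-- ===== PRECONDITION & SPEC =====
-- Pre_ excludes exactly the inputs on which Python A raises IndexError: pos empty
-- with a nonempty barrier list, an empty barrier item, or a column match reaching a
-- missing second coordinate of item or pos.
def Pre_get_south_barrier (pos : List Int) (barrier_pos_list : List (List Int)) : Prop :=
  (barrier_pos_list ≠ [] → 1 ≤ pos.length) ∧
  ∀ item ∈ barrier_pos_list, 1 ≤ item.length ∧
    (PySem.List.pyGet? item 0 = PySem.List.pyGet? pos 0 → 2 ≤ item.length ∧ 2 ≤ pos.length)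
instance (pos : List Int) (barrier_pos_list : List (List Int)) : Decidable (Pre_get_south_barrier pos barrier_pos_list) := by unfold Pre_get_south_barrier; infer_instance
def pvWitness_get_south_barrier : List Int × List (List Int) := ([2, 3], [[2, 5], [1, 4]])

def Spec_get_south_barrier (pos : List Int) (barrier_pos_list : List (List Int)) (out : List Int) : Prop := out = get_south_barrier_alt pos barrier_pos_list
instance (pos : List Int) (barrier_pos_list : List (List Int)) (out : List Int) : Decidable (Spec_get_south_barrier pos barrier_pos_list out) := by unfold Spec_get_south_barrier; infer_instance

-- ===== CLAIM (what is proved, stated in full; the proofs are below) =====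
def Claim_equal_get_south_barrier : Prop := ∀ (pos : List Int) (barrier_pos_list : List (List Int)), Dom_get_south_barrier pos barrier_pos_list → Pre_get_south_barrier pos barrier_pos_list → Spec_get_south_barrier pos barrier_pos_list (get_south_barrier pos barrier_pos_list)

-- ===== LEMMAS AND PROOFS =====
-- running-min step on the already-filtered stream
def minStep (b : Option Int) (d : Int) : Option Int :=
  match b with
  | none => some d
  | some x => some (min x d)

lemma bStep_eq (pos : List Int) (best : Option Int) (item : List Int) :
    bStep pos best item =
      match aItem pos item with
      | none => best
      | some d => minStep best d := by
  unfold bStep aItem minStep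
  by_cases h1 : (PySem.List.pyGet? item 0).getD 0 = (PySem.List.pyGet? pos 0).getD 0 <;>
  by_cases h2 : 0 < (PySem.List.pyGet? item 1).getD 0 - (PySem.List.pyGet? pos 1).getD 0 <;>
  cases best <;> simp [h1, h2, Int.min_def] <;> split_ifs <;> simp <;> omega

lemma fold_eq (pos : List Int) (bl : List (List Int)) (best : Option Int) :
    bl.foldl (bStep pos) best = (bl.filterMap (aItem pos)).foldl minStep best := by
  induction bl generalizing best with
  | nil => rfl
  | cons x t ih =>
    simp only [List.foldl_cons, List.filterMap_cons, bStep_eq]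
    cases h : aItem pos x <;> simp [h, ih]

lemma minFold_some (t : List Int) (x : Int) :
    t.foldl minStep (some x) = some (t.foldl min x) := by
  induction t generalizing x with
  | nil => rfl
  | cons a t ih => simp [minStep, ih]

theorem get_south_barrier_spec : Claim_equal_get_south_barrier := by
  intro pos bl _ _
  unfold Spec_get_south_barrier get_south_barrier get_south_barrier_alt
  rw [fold_eq]
  cases hl : bl.filterMap (aItem pos) with
  | nil => simp [PySem.List.sorted]
  | cons x t =>
    simp only [List.foldl_cons, minStep, minFold_some]
    have hne : PySem.List.sorted (x :: t) (fun x => x) false ≠ [] := by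
      simp [PySem.List.sorted_eq_nil_iff]
    cases hs : PySem.List.sorted (x :: t) (fun x => x) false with
    | nil => exact absurd hs hne
    | cons m rest =>
      simp only [List.length_cons, PySem.List.pyGet?_zero_cons, Option.getD_some]
      have hmin : PySem.List.min? (x :: t) (fun y => y) = some (List.foldl min x t) :=
        PySem.List.min?_id_cons x t
      have hb_mem : List.foldl min x t ∈ x :: t := PySem.List.min?_mem hmin
      have hb_min : ∀ y ∈ x :: t, List.foldl min x t ≤ y := by
        intro y hy; exact PySem.List.min?_isMin hmin y hy
      have hm_mem : m ∈ x :: t := by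
        rw [← PySem.List.mem_sorted (x :: t) (fun x => x) false m, hs]
        exact List.mem_cons_self
      have hm_min : ∀ y ∈ x :: t, m ≤ y :=
        PySem.List.key_head_sorted_le (x :: t) (fun x => x) hs
      have : m = List.foldl min x t :=
        le_antisymm (hm_min _ hb_mem) (hb_min _ hm_mem)
      simp [this]
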